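-- pv_equiv track=rewrite | github.com/mestet/PythonAlgorithms | mgu/ThreeSquaresSum.py | init_squares_list
-- ===== SOURCE A (Python) =====
-- import math
--
-- def init_squares_list(limit):
--     square_parts = set()
--     for a in range(1, int(math.sqrt(limit)) + 1):
--         a_sq = a * a
--         bl = int(math.sqrt(limit - a_sq)) + 1
--         for b in range(a, bl):
--             b_sq = b * b
--             cl = int(math.sqrt(limit - a_sq - b_sq)) + 1
--             for c in range(b, cl):
--                 square_sum = a_sq + b_sq + c * c
--                 square_parts.add(square_sum)
--     return square_parts
-- ===== SOURCE B (Python) =====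
-- def init_squares_list(limit):
--     # Generic recursive generator: add to `out` every sum acc + (k positive
--     # squares), each summand at least lo, that fits in the remaining budget.
--     # No square roots anywhere: each loop is bounded by the test i*i <= budget,
--     # and the budget shrinks as summands are committed.  The last level
--     # (k == 1) adds the completed sums directly.
--     def gen(k, lo, acc, budget, out):
--         i = lo
--         if k == 1:
--             while i * i <= budget:
--                 out.add(acc + i * i)
--                 i += 1
--             return
--         while i * i <= budget:
--             gen(k - 1, i, acc + i * i, budget - i * i, out)
--             i += 1
--     out = set()
--     gen(3, 1, 0, limit, out)
--     return out
-- ===== Notes on version B (the rewrite author's own statement) =====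
-- stated objective: alternative
-- what changed: B replaces A's three hardwired loops with per-level float-sqrt bounds by one generic recursive generator for sums of k positive squares that threads a shrinking budget and bounds each loop by the test i*i <= budget, using no square roots at all.
import Mathlib
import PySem

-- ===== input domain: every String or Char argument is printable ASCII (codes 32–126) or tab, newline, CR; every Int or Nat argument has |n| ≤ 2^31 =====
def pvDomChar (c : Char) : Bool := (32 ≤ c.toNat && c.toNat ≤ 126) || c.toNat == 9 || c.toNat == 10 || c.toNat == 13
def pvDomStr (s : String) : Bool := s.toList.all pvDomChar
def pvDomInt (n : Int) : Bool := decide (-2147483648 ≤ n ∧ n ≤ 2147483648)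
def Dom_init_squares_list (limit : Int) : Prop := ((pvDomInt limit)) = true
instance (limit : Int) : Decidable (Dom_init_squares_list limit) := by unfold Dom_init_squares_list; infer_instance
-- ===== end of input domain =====

-- B replaces A's three nested loops (each bounded by a float sqrt) with one generic
-- recursive generator for sums of k positive squares threading a shrinking budget,
-- with no square roots; same insertion order, hence equal sets.

-- Models A's int(math.sqrt(x)): on the domain 0 ≤ x ≤ 2^31 the double sqrt is exact
-- enough that int(math.sqrt(x)) = ⌊√x⌋ (√x < 2^26 and sqrt is correctly rounded),
-- so this integer square root is an exact port there.
def pySqrt (x : Int) : Int := (Nat.sqrt x.toNat : Int)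

-- ===== PORT A =====
def init_squares_list (limit : Int) : List Int :=
  (PySem.List.pyRange 1 (pySqrt limit + 1) 1).foldl (fun square_parts a =>
    let a_sq := a * a
    let bl := pySqrt (limit - a_sq) + 1
    (PySem.List.pyRange a bl 1).foldl (fun square_parts b =>
      let b_sq := b * b
      let cl := pySqrt (limit - a_sq - b_sq) + 1
      (PySem.List.pyRange b cl 1).foldl (fun square_parts c =>
        PySem.Set.add square_parts (a_sq + b_sq + c * c)) square_parts) square_parts)
    PySem.Set.empty

-- ===== PORT B =====
-- the recursive helper gen(k, lo, acc, budget, out) of Source B; each while loop is a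
-- recursion on i, the recursive call on k-1 is the nested genB (k+1) call
def genB : Nat → Int → Int → Int → PySem.Set Int → PySem.Set Int
  | 0, _, _, _, out => out   -- unreachable: gen is only ever called with k ≥ 1
  | 1, i, acc, budget, out =>
    if _h : i * i ≤ budget then
      genB 1 (i + 1) acc budget (PySem.Set.add out (acc + i * i))
    else out
  | k + 2, i, acc, budget, out =>
    if _h : i * i ≤ budget then
      genB (k + 2) (i + 1) acc budget (genB (k + 1) i (acc + i * i) (budget - i * i) out)
    else out
termination_by k i _ budget _ => (k, (budget + 1 - i).toNat)
decreasing_by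
  · apply Prod.Lex.right
    have hib : i ≤ budget := by nlinarith [mul_self_nonneg (i - 1)]
    omega
  · apply Prod.Lex.left; omega
  · apply Prod.Lex.right
    have hib : i ≤ budget := by nlinarith [mul_self_nonneg (i - 1)]
    omega

def init_squares_list_alt (limit : Int) : List Int :=
  genB 3 1 0 limit PySem.Set.empty

-- ===== PRECONDITION & SPEC =====
-- Pre_ excludes only negative limits, on which A raises ValueError (math.sqrt of a
-- negative number).
def Pre_init_squares_list (limit : Int) : Prop := 0 ≤ limit
instance (limit : Int) : Decidable (Pre_init_squares_list limit) := by unfold Pre_init_squares_list; infer_instance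
def pvWitness_init_squares_list : Int := (30)

def Spec_init_squares_list (limit : Int) (out : List Int) : Prop := out = init_squares_list_alt limit
instance (limit : Int) (out : List Int) : Decidable (Spec_init_squares_list limit out) := by unfold Spec_init_squares_list; infer_instance

-- ===== CLAIM (what is proved, stated in full; the proofs are below) =====
def Claim_equal_init_squares_list : Prop := ∀ (limit : Int), Dom_init_squares_list limit → Pre_init_squares_list limit → Spec_init_squares_list limit (init_squares_list limit)

-- ===== LEMMAS AND PROOFS =====

lemma le_pySqrt_iff (x b : Int) (hx : 0 ≤ x) (hb : 0 < b) : b ≤ pySqrt x ↔ b * b ≤ x := by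
  unfold pySqrt
  rw [show b = ((b.toNat : Int)) from (Int.toNat_of_nonneg (by omega)).symm,
      Int.ofNat_le, Nat.le_sqrt]
  constructor
  · intro h
    have : ((b.toNat * b.toNat : Nat) : Int) ≤ (x.toNat : Int) := by exact_mod_cast h
    omega
  · intro h
    have hb' : ((b.toNat * b.toNat : Nat) : Int) ≤ x := by push_cast; omega
    omega

-- the guard i*i ≤ budget is exactly membership of i in A's sqrt-bounded range
lemma guard_iff (budget i : Int) (hi : 1 ≤ i) : i * i ≤ budget ↔ i ≤ pySqrt budget := by
  by_cases hx : 0 ≤ budget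
  · exact (le_pySqrt_iff budget i hx (by omega)).symm
  · constructor
    · intro h; nlinarith
    · intro h
      have h0 : pySqrt budget = 0 := by
        unfold pySqrt
        have : budget.toNat = 0 := by omega
        simp [this]
      omega

-- the base level (k = 1) of genB is exactly a fold over A's innermost range
lemma gen_base (budget : Int) :
    ∀ (n : Nat) (b acc : Int) (out : PySem.Set Int), (budget + 1 - b).toNat = n → 1 ≤ b →
      genB 1 b acc budget out
        = (PySem.List.pyRange b (pySqrt budget + 1) 1).foldl
            (fun s i => PySem.Set.add s (acc + i * i)) out := by
  intro n
  induction n using Nat.strong_induction_on with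
  | _ n ih =>
    intro b acc out hn hb
    rw [genB]
    by_cases h : b * b ≤ budget
    · have hble : b ≤ pySqrt budget := (guard_iff budget b hb).mp h
      have hbb : b ≤ budget := by nlinarith
      rw [dif_pos h, PySem.List.pyRange_one_cons (by omega : b < pySqrt budget + 1),
          List.foldl_cons]
      exact ih (budget + 1 - (b + 1)).toNat (by omega) (b + 1) acc _ rfl (by omega)
    · have : pySqrt budget + 1 ≤ b := by
        have := (guard_iff budget b hb).mpr
        omega
      rw [dif_neg h, PySem.List.pyRange_one_eq_nil (by omega), List.foldl_nil]

-- a recursive level (k ≥ 2) of genB is exactly a fold over A's sqrt-bounded range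
lemma gen_succ (k : Nat) (budget : Int) :
    ∀ (n : Nat) (b acc : Int) (out : PySem.Set Int), (budget + 1 - b).toNat = n → 1 ≤ b →
      genB (k + 2) b acc budget out
        = (PySem.List.pyRange b (pySqrt budget + 1) 1).foldl
            (fun s i => genB (k + 1) i (acc + i * i) (budget - i * i) s) out := by
  intro n
  induction n using Nat.strong_induction_on with
  | _ n ih =>
    intro b acc out hn hb
    rw [genB]
    by_cases h : b * b ≤ budget
    · have hble : b ≤ pySqrt budget := (guard_iff budget b hb).mp h
      have hbb : b ≤ budget := by nlinarith
      rw [dif_pos h, PySem.List.pyRange_one_cons (by omega : b < pySqrt budget + 1),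
          List.foldl_cons]
      exact ih (budget + 1 - (b + 1)).toNat (by omega) (b + 1) acc _ rfl (by omega)
    · have : pySqrt budget + 1 ≤ b := by
        have := (guard_iff budget b hb).mpr
        omega
      rw [dif_neg h, PySem.List.pyRange_one_eq_nil (by omega), List.foldl_nil]

lemma gen_succ' (k : Nat) (b acc budget : Int) (out : PySem.Set Int) (hb : 1 ≤ b) :
    genB (k + 2) b acc budget out
      = (PySem.List.pyRange b (pySqrt budget + 1) 1).foldl
          (fun s i => genB (k + 1) i (acc + i * i) (budget - i * i) s) out :=
  gen_succ k budget _ b acc out rfl hb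

-- ===== VERDICT (by name: the statement is the Claim_ definition above) =====
theorem init_squares_list_spec : Claim_equal_init_squares_list := by
  intro limit _ _
  unfold Spec_init_squares_list init_squares_list init_squares_list_alt
  rw [gen_succ' 1 1 0 limit PySem.Set.empty le_rfl]
  apply PySem.List.foldl_congr_mem
  intro s a ha
  have ha1 : 1 ≤ a := ((PySem.List.mem_pyRange_one).mp ha).1
  rw [gen_succ' 0 a (0 + a * a) (limit - a * a) s ha1]
  simp only [zero_add]
  apply PySem.List.foldl_congr_mem
  intro s b hbmem
  have hb1 : 1 ≤ b := by
    have := ((PySem.List.mem_pyRange_one).mp hbmem).1; omega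
  rw [gen_base (limit - a * a - b * b) _ b (a * a + b * b) s rfl hb1]
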